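-- pv_equiv track=rewrite | github.com/crazybass81/T-Developer | backend/src/agents/unified/search/modules/search_optimizer.py | _are_terms_related
-- ===== SOURCE A (Python) =====
-- def _are_terms_related(term1: str, term2: str) -> bool:
--     """Check if two terms are semantically related"""
--
--     # Simple related term check (in production, use embeddings)
--     related_groups = [
--         ["ui", "interface", "frontend", "component"],
--         ["api", "service", "backend", "server"],
--         ["database", "storage", "data", "persistence"],
--         ["test", "testing", "qa", "validation"],
--     ]
--
--     term1_lower = term1.lower()
--     term2_lower = term2.lower()
--
--     for group in related_groups:
--         if term1_lower in group and term2_lower in group: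
--             return True
--
--     return False
-- ===== SOURCE B (Python) =====
-- def _are_terms_related(term1: str, term2: str) -> bool:
--     """Check if two terms are semantically related"""
--
--     related_groups = [
--         ["ui", "interface", "frontend", "component"],
--         ["api", "service", "backend", "server"],
--         ["database", "storage", "data", "persistence"],
--         ["test", "testing", "qa", "validation"],
--     ]
--
--     # Build an index: term -> group id, then compare two lookups.
--     index = {}
--     for i, group in enumerate(related_groups):
--         for term in group:
--             index[term] = i
--
--     g1 = index.get(term1.lower())
--     return g1 is not None and g1 == index.get(term2.lower())
-- ===== Notes on version B (the rewrite author's own statement) =====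
-- stated objective: idiomatic
-- what changed: Replaces the per-group nested membership scan with a term-to-group-id index built once by enumerate, then two dict lookups compared for equality (correct because the groups are disjoint).
import Mathlib
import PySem

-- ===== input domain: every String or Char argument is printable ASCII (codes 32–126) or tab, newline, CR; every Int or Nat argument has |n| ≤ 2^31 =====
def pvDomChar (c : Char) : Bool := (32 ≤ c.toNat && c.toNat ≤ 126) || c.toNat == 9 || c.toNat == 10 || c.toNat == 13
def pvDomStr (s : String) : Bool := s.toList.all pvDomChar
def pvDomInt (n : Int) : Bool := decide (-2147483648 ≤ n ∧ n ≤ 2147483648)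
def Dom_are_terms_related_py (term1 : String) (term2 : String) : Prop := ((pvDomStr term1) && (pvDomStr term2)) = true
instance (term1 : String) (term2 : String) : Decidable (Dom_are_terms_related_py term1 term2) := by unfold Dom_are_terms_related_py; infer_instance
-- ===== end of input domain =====

-- B replaces A's per-group nested membership scan with a term→group-id index built once
-- (enumerate over the groups) and two lookups compared for equality (idiomatic; the groups are disjoint).

-- ===== PORT A =====
def pvGroupsA : List (List String) :=
  [["ui", "interface", "frontend", "component"],
   ["api", "service", "backend", "server"],
   ["database", "storage", "data", "persistence"],
   ["test", "testing", "qa", "validation"]]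

-- A's 'for group in related_groups: if t1 in group and t2 in group: return True' loop; [] => the final 'return False'
def pvAloop (t1 : String) (t2 : String) : List (List String) → Bool
  | [] => false
  | g :: rest => if t1 ∈ g ∧ t2 ∈ g then true else pvAloop t1 t2 rest

def are_terms_related_py (term1 : String) (term2 : String) : Bool :=
  let t1 := PySem.Str.lower term1
  let t2 := PySem.Str.lower term2
  pvAloop t1 t2 pvGroupsA

-- ===== PORT B =====
def pvGroupsB : List (List String) :=
  [["ui", "interface", "frontend", "component"],
   ["api", "service", "backend", "server"],
   ["database", "storage", "data", "persistence"],
   ["test", "testing", "qa", "validation"]]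

-- index = {}; for i, group in enumerate(related_groups): for term in group: index[term] = i
def pvIndex : PySem.Dict String Int :=
  (PySem.List.enumerate pvGroupsB).foldl
    (fun d p => p.2.foldl (fun d t => d.insert t p.1) d) PySem.Dict.empty

-- g1 = index.get(term1.lower()); return g1 is not None and g1 == index.get(term2.lower())
def are_terms_related_py_alt (term1 : String) (term2 : String) : Bool :=
  let g1 := pvIndex.get? (PySem.Str.lower term1)
  g1.isSome && (g1 == pvIndex.get? (PySem.Str.lower term2))

-- ===== PRECONDITION & SPEC =====
def Spec_are_terms_related_py (term1 : String) (term2 : String) (out : Bool) : Prop := out = are_terms_related_py_alt term1 term2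
instance (term1 : String) (term2 : String) (out : Bool) : Decidable (Spec_are_terms_related_py term1 term2 out) := by unfold Spec_are_terms_related_py; infer_instance

-- ===== CLAIM (what is proved, stated in full; the proofs are below) =====
def Claim_equal_are_terms_related_py : Prop := ∀ (term1 : String) (term2 : String), Dom_are_terms_related_py term1 term2 → Spec_are_terms_related_py term1 term2 (are_terms_related_py term1 term2)

-- ===== LEMMAS AND PROOFS =====

-- A's loop returns true iff some group contains both terms
lemma pvAloop_iff (t1 t2 : String) (L : List (List String)) :
    pvAloop t1 t2 L = true ↔ ∃ g ∈ L, t1 ∈ g ∧ t2 ∈ g := by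
  induction L with
  | nil => simp [pvAloop]
  | cons g rest ih =>
    simp only [pvAloop]
    split_ifs with h
    · simp [h]
    · simp [ih, h]

-- the built index, written as its chain of inserts (definitional)
lemma pvIndex_chain : pvIndex = ((((((((((((((((PySem.Dict.empty.insert "ui" 0).insert "interface" 0).insert "frontend" 0).insert "component" 0).insert "api" 1).insert "service" 1).insert "backend" 1).insert "server" 1).insert "database" 2).insert "storage" 2).insert "data" 2).insert "persistence" 2).insert "test" 3).insert "testing" 3).insert "qa" 3).insert "validation" 3) := rfl

-- a successful lookup identifies the (unique) group of the key
lemma pvIndex_some (s : String) (i : Int) (h : pvIndex.get? s = some i) :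
      ((i = 0 ∧ s ∈ ["ui", "interface", "frontend", "component"]) ∨
       (i = 1 ∧ s ∈ ["api", "service", "backend", "server"]) ∨
       (i = 2 ∧ s ∈ ["database", "storage", "data", "persistence"]) ∨
       (i = 3 ∧ s ∈ ["test", "testing", "qa", "validation"])) := by
  rw [pvIndex_chain] at h
  by_cases evalidation : s = "validation"
  · subst evalidation; rw [PySem.Dict.get?_insert_self] at h; injection h with h'; subst h'; simp
  rw [PySem.Dict.get?_insert_of_ne _ _ evalidation] at h
  by_cases eqa : s = "qa"
  · subst eqa; rw [PySem.Dict.get?_insert_self] at h; injection h with h'; subst h'; simp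
  rw [PySem.Dict.get?_insert_of_ne _ _ eqa] at h
  by_cases etesting : s = "testing"
  · subst etesting; rw [PySem.Dict.get?_insert_self] at h; injection h with h'; subst h'; simp
  rw [PySem.Dict.get?_insert_of_ne _ _ etesting] at h
  by_cases etest : s = "test"
  · subst etest; rw [PySem.Dict.get?_insert_self] at h; injection h with h'; subst h'; simp
  rw [PySem.Dict.get?_insert_of_ne _ _ etest] at h
  by_cases epersistence : s = "persistence"
  · subst epersistence; rw [PySem.Dict.get?_insert_self] at h; injection h with h'; subst h'; simp
  rw [PySem.Dict.get?_insert_of_ne _ _ epersistence] at h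
  by_cases edata : s = "data"
  · subst edata; rw [PySem.Dict.get?_insert_self] at h; injection h with h'; subst h'; simp
  rw [PySem.Dict.get?_insert_of_ne _ _ edata] at h
  by_cases estorage : s = "storage"
  · subst estorage; rw [PySem.Dict.get?_insert_self] at h; injection h with h'; subst h'; simp
  rw [PySem.Dict.get?_insert_of_ne _ _ estorage] at h
  by_cases edatabase : s = "database"
  · subst edatabase; rw [PySem.Dict.get?_insert_self] at h; injection h with h'; subst h'; simp
  rw [PySem.Dict.get?_insert_of_ne _ _ edatabase] at h
  by_cases eserver : s = "server"
  · subst eserver; rw [PySem.Dict.get?_insert_self] at h; injection h with h'; subst h'; simp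
  rw [PySem.Dict.get?_insert_of_ne _ _ eserver] at h
  by_cases ebackend : s = "backend"
  · subst ebackend; rw [PySem.Dict.get?_insert_self] at h; injection h with h'; subst h'; simp
  rw [PySem.Dict.get?_insert_of_ne _ _ ebackend] at h
  by_cases eservice : s = "service"
  · subst eservice; rw [PySem.Dict.get?_insert_self] at h; injection h with h'; subst h'; simp
  rw [PySem.Dict.get?_insert_of_ne _ _ eservice] at h
  by_cases eapi : s = "api"
  · subst eapi; rw [PySem.Dict.get?_insert_self] at h; injection h with h'; subst h'; simp
  rw [PySem.Dict.get?_insert_of_ne _ _ eapi] at h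
  by_cases ecomponent : s = "component"
  · subst ecomponent; rw [PySem.Dict.get?_insert_self] at h; injection h with h'; subst h'; simp
  rw [PySem.Dict.get?_insert_of_ne _ _ ecomponent] at h
  by_cases efrontend : s = "frontend"
  · subst efrontend; rw [PySem.Dict.get?_insert_self] at h; injection h with h'; subst h'; simp
  rw [PySem.Dict.get?_insert_of_ne _ _ efrontend] at h
  by_cases einterface : s = "interface"
  · subst einterface; rw [PySem.Dict.get?_insert_self] at h; injection h with h'; subst h'; simp
  rw [PySem.Dict.get?_insert_of_ne _ _ einterface] at h
  by_cases eui : s = "ui"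
  · subst eui; rw [PySem.Dict.get?_insert_self] at h; injection h with h'; subst h'; simp
  rw [PySem.Dict.get?_insert_of_ne _ _ eui] at h
  simp at h

-- membership in a group determines the lookup
lemma pvMem0 (s : String) (h : s ∈ ["ui", "interface", "frontend", "component"]) :
    pvIndex.get? s = some 0 := by
  simp only [List.mem_cons, List.not_mem_nil, or_false] at h
  rcases h with rfl | rfl | rfl | rfl <;> decide

lemma pvMem1 (s : String) (h : s ∈ ["api", "service", "backend", "server"]) :
    pvIndex.get? s = some 1 := by
  simp only [List.mem_cons, List.not_mem_nil, or_false] at h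
  rcases h with rfl | rfl | rfl | rfl <;> decide

lemma pvMem2 (s : String) (h : s ∈ ["database", "storage", "data", "persistence"]) :
    pvIndex.get? s = some 2 := by
  simp only [List.mem_cons, List.not_mem_nil, or_false] at h
  rcases h with rfl | rfl | rfl | rfl <;> decide

lemma pvMem3 (s : String) (h : s ∈ ["test", "testing", "qa", "validation"]) :
    pvIndex.get? s = some 3 := by
  simp only [List.mem_cons, List.not_mem_nil, or_false] at h
  rcases h with rfl | rfl | rfl | rfl <;> decide

-- the two computations agree on every pair of (lowered) strings
lemma pv_eq (x y : String) :
    pvAloop x y pvGroupsA =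
      ((pvIndex.get? x).isSome && (pvIndex.get? x == pvIndex.get? y)) := by
  rw [Bool.eq_iff_iff, pvAloop_iff]
  constructor
  · rintro ⟨g, hg, hx, hy⟩
    simp only [pvGroupsA, List.mem_cons, List.not_mem_nil, or_false] at hg
    rcases hg with rfl | rfl | rfl | rfl
    · simp [pvMem0 x hx, pvMem0 y hy]
    · simp [pvMem1 x hx, pvMem1 y hy]
    · simp [pvMem2 x hx, pvMem2 y hy]
    · simp [pvMem3 x hx, pvMem3 y hy]
  · intro hb
    rcases hgx : pvIndex.get? x with _ | i
    · rw [hgx] at hb; simp at hb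
    · have hgy : pvIndex.get? y = some i := by
        rw [hgx] at hb
        simp only [Option.isSome_some, Bool.true_and, beq_iff_eq] at hb
        exact hb.symm
      have hxc := pvIndex_some x i hgx
      have hyc := pvIndex_some y i hgy
      rcases hxc with ⟨rfl, hx⟩ | ⟨rfl, hx⟩ | ⟨rfl, hx⟩ | ⟨rfl, hx⟩ <;>
        rcases hyc with ⟨hi, hy⟩ | ⟨hi, hy⟩ | ⟨hi, hy⟩ | ⟨hi, hy⟩ <;>
          first
            | (exact absurd hi (by decide))
            | (refine ⟨_, ?_, hx, hy⟩; simp [pvGroupsA])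

-- ===== VERDICT (by name: the statement is the Claim_ definition above) =====
theorem are_terms_related_py_spec : Claim_equal_are_terms_related_py := by
  intro term1 term2 _
  unfold Spec_are_terms_related_py are_terms_related_py are_terms_related_py_alt
  exact pv_eq (PySem.Str.lower term1) (PySem.Str.lower term2)
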